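-- pv_equiv track=rewrite | github.com/jvanegmond/aoc | 2024/day4/solve1.py | yield_diagonal_characters
-- ===== SOURCE A (Python) =====
-- def yield_diagonal_characters(lines):
--     # This only works when line length and number of lines is identical
--     line_len = len(lines)
--
--     # Look first for "/ forward"-diagonals, start at column -line_len and seek down + right
--     for start_col in range(-1 * line_len, line_len, 1):
--         diagonal = []
--         for n in range(line_len):
--             row_num = n
--             col_num = start_col + n
--             if row_num < 0 or row_num >= line_len or col_num < 0 or col_num >= line_len:
--                 continue
--             diagonal.append(lines[row_num][col_num])
--         if len(diagonal) >= 4: # May contain XMAS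
--             yield diagonal
--
--     # Then "\ back"-diagonals, start at column 0 and seek down + left
--     for start_col in range(0, line_len * 2, 1):
--         diagonal = []
--         for n in range(0, -1 * line_len, -1):
--             row_num = -1 * n
--             col_num = start_col + n
--             if row_num < 0 or row_num >= line_len or col_num < 0 or col_num >= line_len:
--                 continue
--             diagonal.append(lines[row_num][col_num])
--         if len(diagonal) >= 4: # May contain XMAS
--             yield diagonal
-- ===== SOURCE B (Python) =====
-- def yield_diagonal_characters(lines):
--     L = len(lines)
--     fwd = [[] for _ in range(2 * L - 1)]
--     back = [[] for _ in range(2 * L - 1)]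
--     for r in range(L):
--         row = lines[r]
--         for c in range(L):
--             ch = row[c]
--             fwd[c - r + L - 1].append(ch)
--             back[c + r].append(ch)
--     for bucket in fwd:
--         if len(bucket) >= 4:
--             yield bucket
--     for bucket in back:
--         if len(bucket) >= 4:
--             yield bucket
-- ===== Notes on version B (the rewrite author's own statement) =====
-- stated objective: alternative
-- what changed: Instead of rescanning the full row range with bound checks for each of the 4n diagonal offsets, B makes one pass over the grid cells and buckets each character into position-indexed forward (c-r+L-1) and backward (c+r) diagonal tables, then emits the buckets of length >= 4 in order.
import Mathlib
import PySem

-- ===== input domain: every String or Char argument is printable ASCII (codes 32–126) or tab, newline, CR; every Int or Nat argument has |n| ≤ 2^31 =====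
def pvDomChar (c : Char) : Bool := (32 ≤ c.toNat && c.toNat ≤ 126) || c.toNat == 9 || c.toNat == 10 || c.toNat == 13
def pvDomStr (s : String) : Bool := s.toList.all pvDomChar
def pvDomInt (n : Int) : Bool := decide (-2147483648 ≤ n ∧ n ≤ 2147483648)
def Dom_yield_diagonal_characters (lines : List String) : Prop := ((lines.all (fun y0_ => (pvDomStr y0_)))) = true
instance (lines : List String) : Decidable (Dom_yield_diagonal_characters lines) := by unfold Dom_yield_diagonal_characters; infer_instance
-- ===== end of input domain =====

-- B replaces A's per-offset rescans of the whole row range by one pass over the grid that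
-- buckets each character into position-indexed forward/backward diagonal tables (alternative
-- decomposition, same asymptotic cost).

-- lines[r][c] as a 1-character string; "" only where Python would raise (excluded by Pre_).
def pyCharAt (lines : List String) (r c : Int) : String :=
  match PySem.Str.pyGet? (PySem.List.pyGetD lines r "") c with
  | some ch => String.ofList [ch]
  | none => ""

-- ===== PORT A =====
def yield_diagonal_characters (lines : List String) : List (List String) :=
  let line_len : Int := lines.length
  let fwd := (PySem.List.pyRange (-1 * line_len) line_len 1).foldl (fun acc start_col =>
    let diagonal := (PySem.List.pyRange 0 line_len 1).foldl (fun d n =>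
      let row_num := n
      let col_num := start_col + n
      if row_num < 0 ∨ line_len ≤ row_num ∨ col_num < 0 ∨ line_len ≤ col_num then d
      else d ++ [pyCharAt lines row_num col_num]) []
    if 4 ≤ diagonal.length then acc ++ [diagonal] else acc) []
  let back := (PySem.List.pyRange 0 (line_len * 2) 1).foldl (fun acc start_col =>
    let diagonal := (PySem.List.pyRange 0 (-1 * line_len) (-1)).foldl (fun d n =>
      let row_num := -1 * n
      let col_num := start_col + n
      if row_num < 0 ∨ line_len ≤ row_num ∨ col_num < 0 ∨ line_len ≤ col_num then d
      else d ++ [pyCharAt lines row_num col_num]) []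
    if 4 ≤ diagonal.length then acc ++ [diagonal] else acc) []
  fwd ++ back

-- ===== PORT B =====
-- fwd[i].append(x) (index always in range in B)
def bucketApp (bs : List (List String)) (i : Nat) (x : String) : List (List String) :=
  bs.set i (bs.getD i [] ++ [x])

def yield_diagonal_characters_alt (lines : List String) : List (List String) :=
  let L := lines.length
  let init : List (List String) := List.replicate (2 * L - 1) []
  let p := (List.range L).foldl
    (fun (p : List (List String) × List (List String)) (r : Nat) =>
      (List.range L).foldl
        (fun (p : List (List String) × List (List String)) (c : Nat) =>
          let ch := pyCharAt lines (r : Int) (c : Int)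
          (bucketApp p.1 (c + (L - 1) - r) ch, bucketApp p.2 (c + r) ch))
        p)
    (init, init)
  p.1.foldl (fun acc b => if 4 ≤ b.length then acc ++ [b] else acc) [] ++
  p.2.foldl (fun acc b => if 4 ≤ b.length then acc ++ [b] else acc) []

-- ===== PRECONDITION & SPEC =====
-- Pre_: Python A indexes every line at all columns 0..len(lines)-1, so it raises IndexError
-- exactly when some line is shorter than the number of lines; those inputs are excluded.
def Pre_yield_diagonal_characters (lines : List String) : Prop :=
  ∀ s ∈ lines, lines.length ≤ s.toList.length
instance (lines : List String) : Decidable (Pre_yield_diagonal_characters lines) := by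
  unfold Pre_yield_diagonal_characters; infer_instance

def pvWitness_yield_diagonal_characters : List String := ["XMAS", "MASX", "ASXM", "SXMA"]

def Spec_yield_diagonal_characters (lines : List String) (out : List (List String)) : Prop := out = yield_diagonal_characters_alt lines
instance (lines : List String) (out : List (List String)) : Decidable (Spec_yield_diagonal_characters lines out) := by unfold Spec_yield_diagonal_characters; infer_instance

-- ===== CLAIM (what is proved, stated in full; the proofs are below) =====
def Claim_equal_yield_diagonal_characters : Prop := ∀ (lines : List String), Dom_yield_diagonal_characters lines → Pre_yield_diagonal_characters lines → Spec_yield_diagonal_characters lines (yield_diagonal_characters lines)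

-- ===== LEMMAS AND PROOFS =====

lemma foldl_skip_append {α β : Type} (C : α → Prop) [DecidablePred C] (g : α → β)
    (l : List α) (acc : List β) :
    l.foldl (fun d n => if C n then d else d ++ [g n]) acc
      = acc ++ (l.filter (fun n => decide ¬ C n)).map g := by
  have h : (fun (d : List β) (n : α) => if C n then d else d ++ [g n])
      = fun (d : List β) (n : α) => if decide (¬ C n) = true then d ++ [g n] else d := by
    funext d n; by_cases hc : C n <;> simp [hc]
  rw [h, PySem.List.foldl_append_if]

lemma foldl_yield {α : Type} (g : α → List String) (l : List α) :
    l.foldl (fun acc s => if 4 ≤ (g s).length then acc ++ [g s] else acc) []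
      = (l.map g).filter (fun b => decide (4 ≤ b.length)) := by
  calc l.foldl (fun acc s => if 4 ≤ (g s).length then acc ++ [g s] else acc) []
      = (l.map g).foldl (fun acc b => if 4 ≤ b.length then acc ++ [b] else acc) [] :=
        (List.foldl_map (f := g)
          (g := fun acc b => if 4 ≤ b.length then acc ++ [b] else acc) (l := l) (init := [])).symm
    _ = _ := by rw [PySem.List.foldl_append_ite_eq_filter]; simp

lemma bucketApp_map (W t : Nat) (f : Nat → List String) (x : String) (ht : t < W) :
    bucketApp ((List.range W).map f) t x
      = (List.range W).map (fun i => if i = t then f i ++ [x] else f i) := by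
  unfold bucketApp
  rw [PySem.List.getD_map_range f W t [] ht]
  apply List.ext_getElem
  · simp
  · intro j h1 h2
    simp only [List.getElem_set, List.getElem_map, List.getElem_range] at *
    by_cases hj : j = t
    · simp [hj]
    · rw [if_neg (fun h : t = j => hj h.symm), if_neg hj]

lemma foldl_bucketApp {α : Type} (cs : List α) (idx : α → Nat) (val : α → String) (W : Nat)
    (f : Nat → List String) (h : ∀ x ∈ cs, idx x < W) :
    cs.foldl (fun bs x => bucketApp bs (idx x) (val x)) ((List.range W).map f)
      = (List.range W).map (fun i => f i ++ (cs.filter (fun x => idx x == i)).map val) := by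
  induction cs generalizing f with
  | nil => simp
  | cons a cs ih =>
    rw [List.foldl_cons, bucketApp_map W (idx a) f (val a) (h a (by simp)),
        ih _ (fun x hx => h x (by simp [hx]))]
    have : (fun i => (if i = idx a then f i ++ [val a] else f i)
              ++ (cs.filter (fun x => idx x == i)).map val)
         = fun i => f i ++ (((a :: cs).filter (fun x => idx x == i)).map val) := by
      funext i
      by_cases hi : i = idx a
      · simp [hi, List.append_assoc]
      · have hne : ¬ (idx a == i) = true := by simp; exact fun h => hi h.symm
        simp [hne, hi]
    rw [this]

lemma range_filter_beq (n t : Nat) :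
    (List.range n).filter (fun c => c == t) = if t < n then [t] else [] := by
  induction n with
  | zero => simp
  | succ m ih =>
    rw [List.range_succ, List.filter_append, ih]
    by_cases h1 : t < m
    · have : ¬ (m == t) = true := by simp; omega
      simp [h1, Nat.lt_succ_of_lt h1, this]
    · by_cases h2 : t = m
      · simp [h2]
      · have h3 : ¬ t < m + 1 := by omega
        have h4 : ¬ (m == t) = true := by simp; omega
        simp [h1, h3, h4]

lemma flatMap_ite_singleton {α β : Type} (l : List α) (P : α → Bool) (g : α → β) :
    l.flatMap (fun a => if P a then [g a] else []) = (l.filter P).map g := by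
  induction l with
  | nil => simp
  | cons a l ih =>
    by_cases h : P a <;> simp [h, ih]

def cells (L : Nat) : List (Nat × Nat) :=
  (List.range L).flatMap (fun r => (List.range L).map (fun c => (r, c)))

def bucketF (lines : List String) (i : Nat) : List String :=
  ((List.range lines.length).filter
      (fun r => decide (lines.length ≤ i + r + 1 ∧ i + r + 1 - lines.length < lines.length))).map
    (fun (r : Nat) => pyCharAt lines (r : Int) ((i + r + 1 - lines.length : Nat) : Int))

def bucketB (lines : List String) (i : Nat) : List String :=
  ((List.range lines.length).filter (fun r => decide (r ≤ i ∧ i - r < lines.length))).map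
    (fun (r : Nat) => pyCharAt lines (r : Int) ((i - r : Nat) : Int))

lemma nested_to_cells (L : Nat) (bs0 : List (List String)) (idx : Nat → Nat → Nat)
    (v : Nat → Nat → String) :
    (List.range L).foldl
        (fun bs r => (List.range L).foldl (fun bs c => bucketApp bs (idx r c) (v r c)) bs) bs0
      = (cells L).foldl (fun bs rc => bucketApp bs (idx rc.1 rc.2) (v rc.1 rc.2)) bs0 := by
  rw [cells, List.foldl_flatMap]
  simp only [List.foldl_map]

lemma foldl_pair_split {β σ₁ σ₂ : Type} (f : σ₁ → β → σ₁) (g : σ₂ → β → σ₂) (l : List β)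
    (p : σ₁ × σ₂) :
    l.foldl (fun s e => (f s.1 e, g s.2 e)) p = (l.foldl f p.1, l.foldl g p.2) := by
  rcases p with ⟨a, b⟩
  exact PySem.List.foldl_prod_mk f g l a b

lemma chunkF (L i r : Nat) (hr : r < L) (g : Nat → String) :
    ((List.range L).filter (fun c => c + (L - 1) - r == i)).map g
      = if decide (L ≤ i + r + 1 ∧ i + r + 1 - L < L) = true then [g (i + r + 1 - L)] else [] := by
  by_cases hc : L ≤ i + r + 1 ∧ i + r + 1 - L < L
  · rw [List.filter_congr (q := fun c => c == i + r + 1 - L)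
      (by intro c hcm; simp only [List.mem_range] at hcm
          apply Bool.eq_iff_iff.mpr; simp only [beq_iff_eq]; constructor <;> intro h <;> omega)]
    rw [range_filter_beq, if_pos hc.2, if_pos (decide_eq_true hc)]
    simp only [List.map_cons, List.map_nil]
  · rw [List.filter_congr (q := fun _ => false)
      (by intro c hcm; simp only [List.mem_range] at hcm
          rw [Bool.eq_false_iff]; simp only [ne_eq, beq_iff_eq]; omega)]
    rw [List.filter_false, if_neg (fun h => hc (of_decide_eq_true h))]
    simp only [List.map_nil]

lemma chunkB (L i r : Nat) (hr : r < L) (g : Nat → String) :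
    ((List.range L).filter (fun c => c + r == i)).map g
      = if decide (r ≤ i ∧ i - r < L) = true then [g (i - r)] else [] := by
  by_cases hc : r ≤ i ∧ i - r < L
  · rw [List.filter_congr (q := fun c => c == i - r)
      (by intro c hcm; simp only [List.mem_range] at hcm
          apply Bool.eq_iff_iff.mpr; simp only [beq_iff_eq]; constructor <;> intro h <;> omega)]
    rw [range_filter_beq, if_pos hc.2, if_pos (decide_eq_true hc)]
    simp only [List.map_cons, List.map_nil]
  · rw [List.filter_congr (q := fun _ => false)
      (by intro c hcm; simp only [List.mem_range] at hcm
          rw [Bool.eq_false_iff]; simp only [ne_eq, beq_iff_eq]; omega)]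
    rw [List.filter_false, if_neg (fun h => hc (of_decide_eq_true h))]
    simp only [List.map_nil]

lemma alt_eq (lines : List String) :
    yield_diagonal_characters_alt lines
      = ((List.range (2 * lines.length - 1)).map (bucketF lines)).filter
          (fun b => decide (4 ≤ b.length))
        ++ ((List.range (2 * lines.length - 1)).map (bucketB lines)).filter
          (fun b => decide (4 ≤ b.length)) := by
  have hinit : (List.replicate (2 * lines.length - 1) ([] : List String))
      = (List.range (2 * lines.length - 1)).map (fun _ => []) := by
    simp [List.map_const']
  simp only [yield_diagonal_characters_alt, hinit]
  rw [show (fun (p : List (List String) × List (List String)) (r : Nat) =>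
        (List.range lines.length).foldl
          (fun (p : List (List String) × List (List String)) (c : Nat) =>
            (bucketApp p.1 (c + (lines.length - 1) - r) (pyCharAt lines (r : Int) (c : Int)),
             bucketApp p.2 (c + r) (pyCharAt lines (r : Int) (c : Int))))
          p)
      = (fun (p : List (List String) × List (List String)) (r : Nat) =>
          ((List.range lines.length).foldl
             (fun bs c => bucketApp bs (c + (lines.length - 1) - r)
               (pyCharAt lines (r : Int) (c : Int))) p.1,
           (List.range lines.length).foldl
             (fun bs c => bucketApp bs (c + r) (pyCharAt lines (r : Int) (c : Int))) p.2))
    from by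
      funext p r
      exact foldl_pair_split
        (fun bs c => bucketApp bs (c + (lines.length - 1) - r) (pyCharAt lines (r : Int) (c : Int)))
        (fun bs c => bucketApp bs (c + r) (pyCharAt lines (r : Int) (c : Int)))
        (List.range lines.length) p]
  rw [foldl_pair_split
        (fun bs (r : Nat) => (List.range lines.length).foldl
          (fun bs c => bucketApp bs (c + (lines.length - 1) - r)
            (pyCharAt lines (r : Int) (c : Int))) bs)
        (fun bs (r : Nat) => (List.range lines.length).foldl
          (fun bs c => bucketApp bs (c + r) (pyCharAt lines (r : Int) (c : Int))) bs)
        (List.range lines.length) _]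
  rw [nested_to_cells lines.length _ (fun r c => c + (lines.length - 1) - r)
        (fun r c => pyCharAt lines (r : Int) (c : Int)),
      nested_to_cells lines.length _ (fun r c => c + r)
        (fun r c => pyCharAt lines (r : Int) (c : Int))]
  rw [foldl_bucketApp (cells lines.length) (fun rc => rc.2 + (lines.length - 1) - rc.1)
        (fun rc => pyCharAt lines (rc.1 : Int) (rc.2 : Int)) (2 * lines.length - 1) _
        (by intro x hx; simp only [cells, List.mem_flatMap, List.mem_map, List.mem_range] at hx
            obtain ⟨r, hr, c, hc, rfl⟩ := hx; simp; omega),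
      foldl_bucketApp (cells lines.length) (fun rc => rc.2 + rc.1)
        (fun rc => pyCharAt lines (rc.1 : Int) (rc.2 : Int)) (2 * lines.length - 1) _
        (by intro x hx; simp only [cells, List.mem_flatMap, List.mem_map, List.mem_range] at hx
            obtain ⟨r, hr, c, hc, rfl⟩ := hx; simp; omega)]
  rw [PySem.List.foldl_append_ite_eq_filter, PySem.List.foldl_append_ite_eq_filter]
  simp only [List.nil_append]
  show List.filter _ (List.map _ _) ++ List.filter _ (List.map _ _) = _
  congr 1
  · congr 1
    apply List.map_congr_left
    intro i _
    try simp only [List.nil_append]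
    rw [cells, List.filter_flatMap, List.map_flatMap]
    rw [List.flatMap_congr (g := fun r =>
        if decide (lines.length ≤ i + r + 1 ∧ i + r + 1 - lines.length < lines.length) = true
        then [pyCharAt lines (r : Int) ((i + r + 1 - lines.length : Nat) : Int)] else [])
      (by
        intro r hr
        rw [List.filter_map, List.map_map]
        exact chunkF lines.length i r (by simpa using hr)
          (fun c => pyCharAt lines (r : Int) (c : Int)))]
    rw [flatMap_ite_singleton]
    rfl
  · congr 1
    apply List.map_congr_left
    intro i _
    try simp only [List.nil_append]
    rw [cells, List.filter_flatMap, List.map_flatMap]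
    rw [List.flatMap_congr (g := fun r =>
        if decide (r ≤ i ∧ i - r < lines.length) = true
        then [pyCharAt lines (r : Int) ((i - r : Nat) : Int)] else [])
      (by
        intro r hr
        rw [List.filter_map, List.map_map]
        exact chunkB lines.length i r (by simpa using hr)
          (fun c => pyCharAt lines (r : Int) (c : Int)))]
    rw [flatMap_ite_singleton]
    rfl

def GA (lines : List String) (s : Int) : List String :=
  (PySem.List.pyRange 0 (lines.length : Int) 1).foldl (fun d n =>
    if n < 0 ∨ (lines.length : Int) ≤ n ∨ s + n < 0 ∨ (lines.length : Int) ≤ s + n then d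
    else d ++ [pyCharAt lines n (s + n)]) []

def GB (lines : List String) (s : Int) : List String :=
  (PySem.List.pyRange 0 (-1 * (lines.length : Int)) (-1)).foldl (fun d n =>
    if -1 * n < 0 ∨ (lines.length : Int) ≤ -1 * n ∨ s + n < 0 ∨ (lines.length : Int) ≤ s + n then d
    else d ++ [pyCharAt lines (-1 * n) (s + n)]) []

lemma a_eq (lines : List String) :
    yield_diagonal_characters lines
      = ((PySem.List.pyRange (-1 * (lines.length : Int)) (lines.length : Int) 1).map
          (GA lines)).filter (fun b => decide (4 ≤ b.length))
        ++ ((PySem.List.pyRange 0 ((lines.length : Int) * 2) 1).map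
          (GB lines)).filter (fun b => decide (4 ≤ b.length)) := by
  show ((PySem.List.pyRange (-1 * (lines.length : Int)) (lines.length : Int) 1).foldl
      (fun acc s => if 4 ≤ (GA lines s).length then acc ++ [GA lines s] else acc) [])
    ++ ((PySem.List.pyRange 0 ((lines.length : Int) * 2) 1).foldl
      (fun acc s => if 4 ≤ (GB lines s).length then acc ++ [GB lines s] else acc) []) = _
  rw [foldl_yield (GA lines), foldl_yield (GB lines)]

lemma GA_filter (lines : List String) (s : Int) :
    GA lines s
      = ((PySem.List.pyRange 0 (lines.length : Int) 1).filter
          (fun n => decide ¬(n < 0 ∨ (lines.length : Int) ≤ n ∨ s + n < 0 ∨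
            (lines.length : Int) ≤ s + n))).map (fun n => pyCharAt lines n (s + n)) := by
  unfold GA
  rw [foldl_skip_append
    (fun n => n < 0 ∨ (lines.length : Int) ≤ n ∨ s + n < 0 ∨ (lines.length : Int) ≤ s + n)
    (fun n => pyCharAt lines n (s + n))]
  simp only [List.nil_append]

lemma GB_filter (lines : List String) (s : Int) :
    GB lines s
      = ((PySem.List.pyRange 0 (-1 * (lines.length : Int)) (-1)).filter
          (fun n => decide ¬(-1 * n < 0 ∨ (lines.length : Int) ≤ -1 * n ∨ s + n < 0 ∨
            (lines.length : Int) ≤ s + n))).map (fun n => pyCharAt lines (-1 * n) (s + n)) := by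
  unfold GB
  rw [foldl_skip_append
    (fun n => -1 * n < 0 ∨ (lines.length : Int) ≤ -1 * n ∨ s + n < 0 ∨
      (lines.length : Int) ≤ s + n)
    (fun n => pyCharAt lines (-1 * n) (s + n))]
  simp only [List.nil_append]

lemma GA_neg (lines : List String) :
    GA lines (-1 * (lines.length : Int)) = [] := by
  rw [GA_filter]
  rw [List.filter_congr (q := fun _ => false)
    (by intro n hn
        rw [PySem.List.mem_pyRange_one] at hn
        rw [Bool.eq_false_iff]; simp only [ne_eq, decide_eq_true_eq, not_not]; omega)]
  rw [List.filter_false, List.map_nil]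

lemma GB_last (lines : List String) :
    GB lines (0 + ((2 * lines.length - 1 : Nat) : Int)) = [] := by
  rw [GB_filter]
  rw [List.filter_congr (q := fun _ => false)
    (by intro n hn
        rw [PySem.List.mem_pyRange_neg_one] at hn
        rw [Bool.eq_false_iff]; simp only [ne_eq, decide_eq_true_eq, not_not]; omega)]
  rw [List.filter_false, List.map_nil]

lemma GA_bucketF (lines : List String) (k : Nat) :
    GA lines (-1 * (lines.length : Int) + 1 + (k : Int)) = bucketF lines k := by
  rw [GA_filter, PySem.List.pyRange_zero_nat, List.filter_map, List.map_map, bucketF]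
  rw [List.filter_congr
      (q := (fun r => decide (lines.length ≤ k + r + 1 ∧
          k + r + 1 - lines.length < lines.length)))
    (by intro r hr; simp only [List.mem_range] at hr
        simp only [Function.comp_apply, decide_eq_decide]
        omega)]
  apply List.map_congr_left
  intro r hr
  simp only [List.mem_filter, List.mem_range, decide_eq_true_eq] at hr
  simp only [Function.comp_apply]
  congr 1
  omega

lemma GB_bucketB (lines : List String) (k : Nat) :
    GB lines (0 + (k : Int)) = bucketB lines k := by
  rw [GB_filter, PySem.List.pyRange_neg_one, bucketB]
  rw [show ((0 : Int) - -1 * (lines.length : Int)).toNat = lines.length from by omega]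
  rw [List.filter_map, List.map_map]
  rw [List.filter_congr
      (q := (fun r => decide (r ≤ k ∧ k - r < lines.length)))
    (by intro r hr; simp only [List.mem_range] at hr
        simp only [Function.comp_apply, decide_eq_decide]
        omega)]
  apply List.map_congr_left
  intro r hr
  simp only [List.mem_filter, List.mem_range, decide_eq_true_eq] at hr
  simp only [Function.comp_apply]
  congr 1
  · omega
  · omega

lemma ports_eq (lines : List String) :
    yield_diagonal_characters lines = yield_diagonal_characters_alt lines := by
  by_cases hL : lines.length = 0
  · have : lines = [] := List.eq_nil_of_length_eq_zero hL
    subst this; rfl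
  · rw [a_eq, alt_eq]
    congr 1
    · rw [PySem.List.pyRange_one_cons (by omega : -1 * (lines.length : Int) < lines.length)]
      rw [List.map_cons, GA_neg, List.filter_cons]
      rw [show (decide (4 ≤ ([] : List String).length)) = false from rfl]
      simp only [Bool.false_eq_true, if_false]
      rw [PySem.List.pyRange_one]
      rw [show ((lines.length : Int) - (-1 * (lines.length : Int) + 1)).toNat
          = 2 * lines.length - 1 from by omega]
      rw [List.map_map]
      congr 1
      apply List.map_congr_left
      intro k _
      exact GA_bucketF lines k
    · rw [PySem.List.pyRange_one]
      rw [show ((lines.length : Int) * 2 - 0).toNat = 2 * lines.length from by omega]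
      rw [show 2 * lines.length = (2 * lines.length - 1) + 1 from by omega, List.range_succ]
      rw [List.map_append, List.map_append, List.filter_append]
      rw [List.map_singleton, List.map_singleton, GB_last, List.filter_cons]
      rw [show (decide (4 ≤ ([] : List String).length)) = false from rfl]
      simp only [Bool.false_eq_true, if_false, List.filter_nil, List.append_nil]
      rw [List.map_map]
      congr 1
      apply List.map_congr_left
      intro k _
      exact GB_bucketB lines k

-- ===== VERDICT (by name: the statement is the Claim_ definition above) =====
theorem yield_diagonal_characters_spec : Claim_equal_yield_diagonal_characters := by
  intro lines _ _
  unfold Spec_yield_diagonal_characters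
  exact ports_eq lines
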